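-- pv_equiv track=rewrite | github.com/ispmor/physionet-2024 | helper_code.py | get_variable
-- ===== SOURCE A (Python) =====
-- def get_variable(string, variable_name):
--     variable = ''
--     has_variable = False
--     for l in string.split('\n'):
--         if l.startswith(variable_name):
--             variable = l[len(variable_name):].strip()
--             has_variable = True
--     return variable, has_variable
-- ===== SOURCE B (Python) =====
-- def get_variable(string, variable_name):
--     for l in reversed(string.split('\n')):
--         if l.startswith(variable_name):
--             return l[len(variable_name):].strip(), True
--     return '', False
-- ===== Notes on version B (the rewrite author's own statement) =====
-- stated objective: alternative
-- what changed: B scans the split lines in reverse and returns at the first match (early exit) instead of A's forward scan that overwrites an accumulator on every match.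
import Mathlib
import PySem

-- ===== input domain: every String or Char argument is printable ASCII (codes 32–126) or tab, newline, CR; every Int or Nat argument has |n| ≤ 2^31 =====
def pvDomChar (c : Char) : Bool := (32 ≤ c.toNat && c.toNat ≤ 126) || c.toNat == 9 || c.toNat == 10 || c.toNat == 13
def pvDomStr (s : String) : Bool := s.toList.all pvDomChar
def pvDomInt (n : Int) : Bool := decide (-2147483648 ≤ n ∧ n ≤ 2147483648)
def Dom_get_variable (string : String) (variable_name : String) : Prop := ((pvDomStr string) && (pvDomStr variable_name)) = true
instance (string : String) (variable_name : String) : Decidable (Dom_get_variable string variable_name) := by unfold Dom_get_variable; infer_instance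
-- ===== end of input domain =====

-- B iterates the lines in reverse and returns at the first match, instead of A's forward accumulator; return values agree everywhere.
-- ===== PORT A =====
def get_variable (string : String) (variable_name : String) : String × Bool :=
  ((PySem.Str.split? string "\n").getD []).foldl
    (fun acc l =>
      if PySem.Str.startswith l variable_name then
        (PySem.Str.strip (PySem.Str.slice l (some (PySem.Str.len variable_name : Int)) none), true)
      else acc)
    ("", false)

-- ===== PORT B =====
-- first match scanning a (reversed) line list; early return
def getVarRev (variable_name : String) : List String → String × Bool
  | [] => ("", false)
  | l :: rest =>
      if PySem.Str.startswith l variable_name then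
        (PySem.Str.strip (PySem.Str.slice l (some (PySem.Str.len variable_name : Int)) none), true)
      else getVarRev variable_name rest

def get_variable_alt (string : String) (variable_name : String) : String × Bool :=
  getVarRev variable_name ((PySem.Str.split? string "\n").getD []).reverse

-- ===== PRECONDITION & SPEC =====
def Spec_get_variable (string : String) (variable_name : String) (out : String × Bool) : Prop := out = get_variable_alt string variable_name
instance (string : String) (variable_name : String) (out : String × Bool) : Decidable (Spec_get_variable string variable_name out) := by unfold Spec_get_variable; infer_instance

-- ===== CLAIM (what is proved, stated in full; the proofs are below) =====
def Claim_equal_get_variable : Prop := ∀ (string : String) (variable_name : String), Dom_get_variable string variable_name → Spec_get_variable string variable_name (get_variable string variable_name)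

-- ===== LEMMAS AND PROOFS =====

theorem getVarRev_append (vn : String) (xs : List String) (l : String) :
    getVarRev vn (xs ++ [l]) =
      if xs.any (fun x => PySem.Str.startswith x vn) then getVarRev vn xs else getVarRev vn [l] := by
  induction xs with
  | nil => simp
  | cons x xs ih =>
      rw [List.cons_append]
      show (if PySem.Str.startswith x vn then _ else getVarRev vn (xs ++ [l])) = _
      rw [ih, List.any_cons]
      cases hx : PySem.Str.startswith x vn with
      | true =>
          have hx' := hx; simp only [PySem.Str.startswith_eq] at hx'
          simp [getVarRev, hx']
      | false =>
          have hx' := hx; simp only [PySem.Str.startswith_eq] at hx'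
          cases hr : xs.any (fun x => PySem.Str.startswith x vn) with
          | true => simp [getVarRev, hx']
          | false => simp

theorem getVarRev_no_match (vn : String) (xs : List String)
    (h : xs.any (fun x => PySem.Str.startswith x vn) = false) :
    getVarRev vn xs = ("", false) := by
  induction xs with
  | nil => rfl
  | cons x xs ih =>
      rw [List.any_cons, Bool.or_eq_false_iff] at h
      have hx' := h.1; simp only [PySem.Str.startswith_eq] at hx'
      show (if PySem.Str.startswith x vn then _ else getVarRev vn xs) = _
      simp only [PySem.Str.startswith_eq, hx', Bool.false_eq_true, if_false]
      exact ih h.2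

theorem foldl_eq_rev (vn : String) (xs : List String) (acc : String × Bool) :
    xs.foldl
      (fun acc l =>
        if PySem.Str.startswith l vn then
          (PySem.Str.strip (PySem.Str.slice l (some (PySem.Str.len vn : Int)) none), true)
        else acc) acc =
    (if xs.any (fun x => PySem.Str.startswith x vn) then getVarRev vn xs.reverse else acc) := by
  induction xs generalizing acc with
  | nil => simp
  | cons l rest ih =>
      rw [List.foldl_cons, ih, List.any_cons, List.reverse_cons, getVarRev_append]
      rw [List.any_reverse]
      cases hr : rest.any (fun x => PySem.Str.startswith x vn) with
      | true => simp
      | false =>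
          cases hl : PySem.Str.startswith l vn with
          | true =>
              have hl' := hl; simp only [PySem.Str.startswith_eq] at hl'
              simp [getVarRev, hl']
          | false =>
              have hl' := hl; simp only [PySem.Str.startswith_eq] at hl'
              simp

-- ===== VERDICT (by name: the statement is the Claim_ definition above) =====
theorem get_variable_spec : Claim_equal_get_variable := by
  intro s vn _
  unfold Spec_get_variable get_variable get_variable_alt
  rw [foldl_eq_rev]
  cases h : ((PySem.Str.split? s "\n").getD []).any (fun x => PySem.Str.startswith x vn) with
  | true => rw [if_pos rfl]
  | false =>
      rw [if_neg (by simp), getVarRev_no_match]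
      rw [List.any_reverse]
      exact h
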